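-- pv_equiv track=rewrite | github.com/panagot/ASI-Agents-Track | agents/simple_agent.py | assess_symptom_severity
-- ===== SOURCE A (Python) =====
-- from typing import Dict, List, Any, Optional
--
-- def assess_symptom_severity(symptoms: List[str]) -> Dict[str, str]:
--     """Assess severity of symptoms"""
--     severity_keywords = {
--         "severe": ["severe", "intense", "unbearable", "excruciating", "debilitating"],
--         "moderate": ["moderate", "noticeable", "uncomfortable", "bothersome"],
--         "mild": ["mild", "slight", "minor", "barely noticeable"]
--     }
--
--     severity_assessment = {}
--     for symptom in symptoms:
--         symptom_lower = symptom.lower()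
--         severity = "mild"  # default
--
--         for level, keywords in severity_keywords.items():
--             if any(keyword in symptom_lower for keyword in keywords):
--                 severity = level
--                 break
--
--         severity_assessment[symptom] = severity
--
--     return severity_assessment
-- ===== SOURCE B (Python) =====
-- def assess_symptom_severity(symptoms):
--     """Assess severity of symptoms"""
--     rank_table = (
--         [(kw, 0) for kw in ["severe", "intense", "unbearable", "excruciating", "debilitating"]]
--         + [(kw, 1) for kw in ["moderate", "noticeable", "uncomfortable", "bothersome"]]
--         + [(kw, 2) for kw in ["mild", "slight", "minor", "barely noticeable"]]
--     )
--     names = ["severe", "moderate", "mild"]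
--     severity_assessment = {}
--     for symptom in symptoms:
--         symptom_lower = symptom.lower()
--         best = 2
--         for kw, rank in rank_table:
--             if kw in symptom_lower:
--                 best = min(best, rank)
--         severity_assessment[symptom] = names[best]
--     return severity_assessment
-- ===== Notes on version B (the rewrite author's own statement) =====
-- stated objective: faster
-- what changed: Replaces A's ordered nested loop over severity levels (with early break and per-level any()) by a single flat pass over a precomputed (keyword, rank) table tracking a running minimum rank, with a rank-to-name list lookup at the end; the mild default falls out of initializing the rank to 2.
import Mathlib
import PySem

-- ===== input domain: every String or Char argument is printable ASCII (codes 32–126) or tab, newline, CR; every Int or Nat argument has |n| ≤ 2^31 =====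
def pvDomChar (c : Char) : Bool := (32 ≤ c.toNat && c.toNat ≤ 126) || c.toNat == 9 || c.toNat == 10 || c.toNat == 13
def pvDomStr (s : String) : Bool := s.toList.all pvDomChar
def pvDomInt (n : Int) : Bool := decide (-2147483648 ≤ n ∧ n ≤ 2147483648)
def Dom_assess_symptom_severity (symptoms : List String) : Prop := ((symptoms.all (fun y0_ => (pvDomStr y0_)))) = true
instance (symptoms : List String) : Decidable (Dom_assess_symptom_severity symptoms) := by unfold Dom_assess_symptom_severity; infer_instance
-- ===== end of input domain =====

-- B replaces A's ordered nested level loop with early break by one flat (keyword, rank) pass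
-- tracking a running minimum rank; objective: simpler.

-- ===== PORT A =====
-- the severity_keywords dict, as an insertion-ordered association list
def pvSeverityKeywords : List (String × List String) :=
  [("severe", ["severe", "intense", "unbearable", "excruciating", "debilitating"]),
   ("moderate", ["moderate", "noticeable", "uncomfortable", "bothersome"]),
   ("mild", ["mild", "slight", "minor", "barely noticeable"])]

-- the inner 'for level, keywords in …: if any(…): severity = level; break' loop (default "mild")
def pvFirstLevel (low : String) : List (String × List String) → String
  | [] => "mild"
  | (lvl, kws) :: rest =>
      if kws.any (fun k => PySem.Str.isIn k low) then lvl else pvFirstLevel low rest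

def assess_symptom_severity (symptoms : List String) : List (String × String) :=
  (symptoms.foldl
    (fun d symptom =>
      d.insert symptom (pvFirstLevel (PySem.Str.lower symptom) pvSeverityKeywords))
    PySem.Dict.empty).items

-- ===== PORT B =====
def pvRankTable : List (String × Int) :=
  (["severe", "intense", "unbearable", "excruciating", "debilitating"].map (fun kw => (kw, (0 : Int))))
  ++ (["moderate", "noticeable", "uncomfortable", "bothersome"].map (fun kw => (kw, (1 : Int))))
  ++ (["mild", "slight", "minor", "barely noticeable"].map (fun kw => (kw, (2 : Int))))

def pvNames : List String := ["severe", "moderate", "mild"]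

def pvBestRank (low : String) : Int :=
  pvRankTable.foldl (fun best p => if PySem.Str.isIn p.1 low then min best p.2 else best) 2

def assess_symptom_severity_alt (symptoms : List String) : List (String × String) :=
  (symptoms.foldl
    (fun d symptom =>
      d.insert symptom
        (PySem.List.pyGetD pvNames (pvBestRank (PySem.Str.lower symptom)) "mild"))
    PySem.Dict.empty).items

-- ===== PRECONDITION & SPEC =====
def Spec_assess_symptom_severity (symptoms : List String) (out : List (String × String)) : Prop := out = assess_symptom_severity_alt symptoms
instance (symptoms : List String) (out : List (String × String)) : Decidable (Spec_assess_symptom_severity symptoms out) := by unfold Spec_assess_symptom_severity; infer_instance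

-- ===== CLAIM (what is proved, stated in full; the proofs are below) =====
def Claim_equal_assess_symptom_severity : Prop := ∀ (symptoms : List String), Dom_assess_symptom_severity symptoms → Spec_assess_symptom_severity symptoms (assess_symptom_severity symptoms)

-- ===== LEMMAS AND PROOFS =====

-- a min-rank fold over a constant-rank segment: hit ⇒ min with that rank, miss ⇒ unchanged
theorem pv_seg_fold (low : String) (r b : Int) (l : List String) :
    (l.map (fun kw => (kw, r))).foldl
        (fun best p => if PySem.Str.isIn p.1 low then min best p.2 else best) b
      = if l.any (fun k => PySem.Str.isIn k low) then min b r else b := by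
  induction l generalizing b with
  | nil => simp
  | cons h t ih =>
    simp only [List.map_cons, List.foldl_cons, List.any_cons]
    rw [ih]
    by_cases hc : PySem.Str.isIn h low = true
    · rw [if_pos hc]
      by_cases hr : (t.any fun k => PySem.Str.isIn k low) = true
      · rw [if_pos hr, if_pos (show (PySem.Str.isIn h low || t.any fun k => PySem.Str.isIn k low) = true by rw [hc, hr]; rfl)]
        omega
      · rw [if_neg hr, if_pos (show (PySem.Str.isIn h low || t.any fun k => PySem.Str.isIn k low) = true by rw [hc]; rfl)]
    · rw [if_neg hc]
      rw [Bool.not_eq_true] at hc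
      by_cases hr : (t.any fun k => PySem.Str.isIn k low) = true
      · rw [if_pos hr, if_pos (show (PySem.Str.isIn h low || t.any fun k => PySem.Str.isIn k low) = true by rw [hc, hr]; rfl)]
      · rw [if_neg hr, if_neg (show ¬ (PySem.Str.isIn h low || t.any fun k => PySem.Str.isIn k low) = true by rw [hc, Bool.not_eq_true, Bool.false_or, ← Bool.not_eq_true]; exact hr)]

-- per-symptom agreement of the two classifiers
theorem pv_classify_eq (low : String) :
    pvFirstLevel low pvSeverityKeywords
      = PySem.List.pyGetD pvNames (pvBestRank low) "mild" := by
  unfold pvFirstLevel pvSeverityKeywords pvBestRank pvRankTable pvNames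
  rw [List.foldl_append, List.foldl_append, pv_seg_fold, pv_seg_fold, pv_seg_fold]
  cases h0 : (["severe", "intense", "unbearable", "excruciating",
      "debilitating"].any (fun k => PySem.Str.isIn k low)) <;>
    cases h1 : (["moderate", "noticeable", "uncomfortable",
        "bothersome"].any (fun k => PySem.Str.isIn k low)) <;>
      cases h2 : (["mild", "slight", "minor",
          "barely noticeable"].any (fun k => PySem.Str.isIn k low)) <;>
        (simp only [pvFirstLevel, h0, h1, h2]; decide)

-- ===== VERDICT (by name: the statement is the Claim_ definition above) =====
theorem assess_symptom_severity_spec : Claim_equal_assess_symptom_severity := by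
  intro symptoms _
  unfold Spec_assess_symptom_severity assess_symptom_severity assess_symptom_severity_alt
  congr 1
  simp only [pv_classify_eq]
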